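-- pv_equiv track=rewrite | github.com/goldrieve/mono-trac | bin/summarise_nuc.py | remove_gene
-- ===== SOURCE A (Python) =====
-- def remove_gene(content, gene_id):
--     lines = content.split('\n')
--     cleaned_lines = []
--     skip = False
--     for line in lines:
--         if line.startswith('>'):
--             if gene_id in line:
--                 skip = True
--             else:
--                 skip = False
--         if not skip:
--             cleaned_lines.append(line)
--     return '\n'.join(cleaned_lines)
-- ===== SOURCE B (Python) =====
-- def _keep(block, gene_id):
--     return not (block and block[0].startswith('>') and gene_id in block[0])
--
--
-- def remove_gene(content, gene_id):
--     lines = content.split('\n')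
--     blocks = []
--     cur = []
--     for line in lines:
--         if line.startswith('>'):
--             blocks.append(cur)
--             cur = [line]
--         else:
--             cur.append(line)
--     blocks.append(cur)
--     return '\n'.join(line for b in blocks if _keep(b, gene_id) for line in b)
-- ===== Notes on version B (the rewrite author's own statement) =====
-- stated objective: alternative
-- what changed: Replaces the stateful skip-flag filter with a partition-into-FASTA-blocks pass followed by a filter on each block's header and a flatten.
import Mathlib
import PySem

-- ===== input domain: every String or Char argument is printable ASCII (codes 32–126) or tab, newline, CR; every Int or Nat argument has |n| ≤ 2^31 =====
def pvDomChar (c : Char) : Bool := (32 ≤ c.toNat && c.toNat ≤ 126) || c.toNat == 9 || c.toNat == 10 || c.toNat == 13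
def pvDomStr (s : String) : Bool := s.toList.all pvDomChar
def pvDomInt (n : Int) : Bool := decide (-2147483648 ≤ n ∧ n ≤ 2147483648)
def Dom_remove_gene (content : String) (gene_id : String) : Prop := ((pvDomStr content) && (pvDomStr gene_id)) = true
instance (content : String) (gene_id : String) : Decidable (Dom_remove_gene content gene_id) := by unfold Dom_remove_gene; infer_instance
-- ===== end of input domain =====

-- B replaces A's stateful skip-flag filter with partition-into-blocks, filter on headers, flatten (alternative decomposition; return value only).


-- ===== PORT A =====
def remove_gene (content : String) (gene_id : String) : String :=
  let lines := (PySem.Str.split? content "\n").getD []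
  let st := lines.foldl (fun (st : List String × Bool) line =>
    let skip := if PySem.Str.startswith line ">" then PySem.Str.isIn gene_id line else st.2
    (if skip then st.1 else st.1 ++ [line], skip)) ([], false)
  PySem.Str.join "\n" st.1

-- ===== PORT B =====
-- B's helper _keep(block, gene_id)
def keepBlock (gene_id : String) (b : List String) : Bool :=
  match b with
  | [] => true
  | h :: _ => !(PySem.Str.startswith h ">" && PySem.Str.isIn gene_id h)

def remove_gene_alt (content : String) (gene_id : String) : String :=
  let lines := (PySem.Str.split? content "\n").getD []
  let st := lines.foldl (fun (st : List (List String) × List String) line =>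
    if PySem.Str.startswith line ">" then (st.1 ++ [st.2], [line]) else (st.1, st.2 ++ [line])) ([], [])
  let blocks := st.1 ++ [st.2]
  PySem.Str.join "\n" ((blocks.filter (keepBlock gene_id)).flatten)

-- ===== PRECONDITION & SPEC =====
def Spec_remove_gene (content : String) (gene_id : String) (out : String) : Prop := out = remove_gene_alt content gene_id
instance (content : String) (gene_id : String) (out : String) : Decidable (Spec_remove_gene content gene_id out) := by unfold Spec_remove_gene; infer_instance

-- ===== CLAIM (what is proved, stated in full; the proofs are below) =====
def Claim_equal_remove_gene : Prop := ∀ (content : String) (gene_id : String), Dom_remove_gene content gene_id → Spec_remove_gene content gene_id (remove_gene content gene_id)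

-- ===== LEMMAS AND PROOFS =====

-- kept part of a single (current) block
def pvKeep (gene_id : String) (c : List String) : List String :=
  if keepBlock gene_id c then c else []

-- flattened kept blocks
def pvFlat (gene_id : String) (bs : List (List String)) : List String :=
  (bs.filter (keepBlock gene_id)).flatten

lemma pvFlat_append (g : String) (bs cs : List (List String)) :
    pvFlat g (bs ++ cs) = pvFlat g bs ++ pvFlat g cs := by
  simp [pvFlat, List.filter_append]

lemma pvFlat_singleton (g : String) (c : List String) :
    pvFlat g [c] = pvKeep g c := by
  unfold pvFlat pvKeep
  cases hc : keepBlock g c <;> simp [hc]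

lemma keepBlock_append (g : String) (c : List String) (line : String)
    (h : PySem.Str.startswith line ">" = false) :
    keepBlock g (c ++ [line]) = keepBlock g c := by
  cases c with
  | nil =>
    show (!(PySem.Str.startswith line ">" && PySem.Str.isIn g line)) = true
    rw [h, Bool.false_and]
    rfl
  | cons a t => rfl

lemma keepBlock_header (g : String) (line : String)
    (h : PySem.Str.startswith line ">" = true) :
    keepBlock g [line] = !PySem.Str.isIn g line := by
  show (!(PySem.Str.startswith line ">" && PySem.Str.isIn g line)) = _
  rw [h, Bool.true_and]

lemma pv_loop_inv (g : String) (lines : List String) :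
    ∀ (acc : List String) (skip : Bool) (blocks : List (List String)) (cur : List String),
    skip = !keepBlock g cur →
    acc = pvFlat g blocks ++ pvKeep g cur →
    (lines.foldl (fun (st : List String × Bool) line =>
      let skip := if PySem.Str.startswith line ">" then PySem.Str.isIn g line else st.2
      (if skip then st.1 else st.1 ++ [line], skip)) (acc, skip)).1
    =
    (fun st : List (List String) × List String => pvFlat g st.1 ++ pvKeep g st.2)
      (lines.foldl (fun (st : List (List String) × List String) line =>
        if PySem.Str.startswith line ">" then (st.1 ++ [st.2], [line]) else (st.1, st.2 ++ [line])) (blocks, cur)) := by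
  induction lines with
  | nil =>
    intro acc skip blocks cur h1 h2
    simpa using h2
  | cons line rest ih =>
    intro acc skip blocks cur h1 h2
    cases hs : PySem.Str.startswith line ">" with
    | true =>
      simp only [List.foldl_cons, hs, if_true]
      refine ih (if PySem.Str.isIn g line then acc else acc ++ [line])
        (PySem.Str.isIn g line) (blocks ++ [cur]) [line]
        (by rw [keepBlock_header g line hs, Bool.not_not]) ?_
      rw [pvFlat_append, h2, pvFlat_singleton]
      unfold pvKeep
      rw [keepBlock_header g line hs]
      cases hin : PySem.Str.isIn g line <;> simp
    | false =>
      simp only [List.foldl_cons, hs, Bool.false_eq_true, if_false]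
      have hk : keepBlock g (cur ++ [line]) = keepBlock g cur := keepBlock_append g cur line hs
      refine ih (if skip then acc else acc ++ [line]) skip blocks (cur ++ [line])
        (by rw [hk]; exact h1) ?_
      rw [h2]
      unfold pvKeep
      rw [hk]
      cases hc : keepBlock g cur <;> simp [h1, hc]

-- ===== VERDICT (by name: the statement is the Claim_ definition above) =====
theorem remove_gene_spec : Claim_equal_remove_gene := by
  intro content gene_id _
  unfold Spec_remove_gene remove_gene remove_gene_alt
  have h := pv_loop_inv gene_id ((PySem.Str.split? content "\n").getD []) [] false [] []
    (by rfl) (by rfl)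
  simp only at h ⊢
  rw [h]
  congr 1
  rw [← pvFlat, pvFlat_append, pvFlat_singleton]
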